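-- pv_equiv track=rewrite | github.com/ellemouton/Final_Year_Project | Code/lightning/pi_specific/B/prices_update/general_helper.py | find_cheapest_route
-- ===== SOURCE A (Python) =====
-- def find_cheapest_route(routes):
--   costs = []
--
--   for i in range(len(routes)):
--     cost = 0
--     for n in routes[i]:
--       cost += n[1]
--     costs.append(cost)
--   return costs.index(min(costs))
-- ===== SOURCE B (Python) =====
-- def find_cheapest_route(routes):
--     order = sorted(range(len(routes)), key=lambda i: sum(n[1] for n in routes[i]))
--     return order[0]
-- ===== Notes on version B (the rewrite author's own statement) =====
-- stated objective: alternative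
-- what changed: B stably sorts the index list by route cost and returns the first index of the sorted order, replacing A's build-a-costs-list then min() then list.index() pipeline (stability of Python's sort gives the earliest index on ties).
import Mathlib
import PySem

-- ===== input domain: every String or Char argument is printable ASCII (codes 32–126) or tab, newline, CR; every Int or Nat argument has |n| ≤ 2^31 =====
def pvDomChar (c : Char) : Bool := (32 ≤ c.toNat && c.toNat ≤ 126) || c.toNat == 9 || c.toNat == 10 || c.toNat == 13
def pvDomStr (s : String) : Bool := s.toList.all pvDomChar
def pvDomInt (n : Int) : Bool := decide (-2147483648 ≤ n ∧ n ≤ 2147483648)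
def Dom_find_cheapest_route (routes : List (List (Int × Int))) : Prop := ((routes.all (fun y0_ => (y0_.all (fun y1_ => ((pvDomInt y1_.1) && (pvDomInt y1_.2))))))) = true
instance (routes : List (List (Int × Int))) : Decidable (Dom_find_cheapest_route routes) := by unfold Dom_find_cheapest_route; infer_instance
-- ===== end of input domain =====

-- B replaces A's build-costs-then-min-then-index pipeline by stably sorting the index list by route cost and taking the first index; return values proved equal on nonempty input.


-- ===== PORT A =====
def find_cheapest_route (routes : List (List (Int × Int))) : Int :=
  -- costs = []; for i in range(len(routes)): cost = 0; for n in routes[i]: cost += n[1]; costs.append(cost)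
  -- (the 'costs' list expression is written out at both of its two use sites; same value)
  match PySem.List.min?
      ((PySem.List.pyRange 0 (routes.length : Int) 1).foldl
        (fun acc i => acc ++ [(PySem.List.pyGetD routes i []).foldl (fun cost n => cost + n.2) 0]) [])
      (fun x => x) with
  | none => 0   -- min([]) raises ValueError; excluded by Pre_
  | some m =>
    -- return costs.index(min(costs))
    (((PySem.List.index?
        ((PySem.List.pyRange 0 (routes.length : Int) 1).foldl
          (fun acc i => acc ++ [(PySem.List.pyGetD routes i []).foldl (fun cost n => cost + n.2) 0]) [])
        m).getD 0 : Nat) : Int)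

-- ===== PORT B =====
def find_cheapest_route_alt (routes : List (List (Int × Int))) : Int :=
  -- order = sorted(range(len(routes)), key=lambda i: sum(n[1] for n in routes[i])); return order[0]
  match PySem.List.sorted (PySem.List.pyRange 0 (routes.length : Int) 1)
      (fun i => (PySem.List.pyGetD routes i []).foldl (fun a n => a + n.2) 0) false with
  | [] => 0   -- order[0] raises IndexError on empty input; excluded by Pre_
  | h :: _ => h

-- ===== PRECONDITION & SPEC =====
-- Pre_ excludes only the empty list, on which A raises ValueError (min of an empty sequence); B raises IndexError there.
def Pre_find_cheapest_route (routes : List (List (Int × Int))) : Prop := routes ≠ []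
instance (routes : List (List (Int × Int))) : Decidable (Pre_find_cheapest_route routes) := by unfold Pre_find_cheapest_route; infer_instance
def pvWitness_find_cheapest_route : (List (List (Int × Int))) := [[(1, 2)], [(0, 1)]]

def Spec_find_cheapest_route (routes : List (List (Int × Int))) (out : Int) : Prop := out = find_cheapest_route_alt routes
instance (routes : List (List (Int × Int))) (out : Int) : Decidable (Spec_find_cheapest_route routes out) := by unfold Spec_find_cheapest_route; infer_instance

-- ===== CLAIM (what is proved, stated in full; the proofs are below) =====
def Claim_equal_find_cheapest_route : Prop := ∀ (routes : List (List (Int × Int))), Dom_find_cheapest_route routes → Pre_find_cheapest_route routes → Spec_find_cheapest_route routes (find_cheapest_route routes)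

-- ===== LEMMAS AND PROOFS =====

-- head of the stable insertion-sort fold = running strict-argmin over the inserted elements
lemma head_foldl_insertBy (f : Int → Int) (l : List Int) : ∀ (y : Int) (ys : List Int),
    (l.foldl (fun acc x => PySem.List.insertBy (fun a b => decide (f a < f b)) x acc) (y :: ys)).head? =
    some (l.foldl (fun h x => if f x < f h then x else h) y) := by
  induction l with
  | nil => intro y ys; simp
  | cons x l ih =>
    intro y ys
    rw [List.foldl_cons, List.foldl_cons]
    by_cases h : f x < f y
    · simp only [PySem.List.insertBy, decide_eq_true_eq, if_pos h]
      exact ih x (y :: ys)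
    · simp only [PySem.List.insertBy, decide_eq_true_eq, if_neg h]
      exact ih y _

-- the running strict-argmin over indices 1..n-1 starting at 0 is the first index of the minimum
lemma argmin_range (f : Int → Int) (n : Int) (hn : 1 ≤ n) :
    0 ≤ (PySem.List.pyRange 1 n 1).foldl (fun h x => if f x < f h then x else h) 0 ∧
    (PySem.List.pyRange 1 n 1).foldl (fun h x => if f x < f h then x else h) 0 < n ∧
    f ((PySem.List.pyRange 1 n 1).foldl (fun h x => if f x < f h then x else h) 0) =
      ((PySem.List.pyRange 1 n 1).map f).foldl min (f 0) ∧
    PySem.List.index? ((PySem.List.pyRange 0 n 1).map f)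
      (f ((PySem.List.pyRange 1 n 1).foldl (fun h x => if f x < f h then x else h) 0)) =
      some ((PySem.List.pyRange 1 n 1).foldl (fun h x => if f x < f h then x else h) 0).toNat := by
  induction n, hn using Int.le_induction with
  | base =>
    simp [PySem.List.pyRange_one_eq_nil (le_refl 1), PySem.List.pyRange_one_cons (by omega : (0:Int) < 1)]
  | succ n hn ih =>
    obtain ⟨h0, h1, hmin, hidx⟩ := ih
    set r := (PySem.List.pyRange 1 n 1).foldl (fun h x => if f x < f h then x else h) 0 with hr
    rw [PySem.List.pyRange_one_succ_right (by omega : (1:Int) ≤ n),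
        PySem.List.pyRange_one_succ_right (by omega : (0:Int) ≤ n),
        List.foldl_append, List.map_append, List.foldl_append, List.map_append]
    simp only [List.foldl_cons, List.foldl_nil, List.map_cons, List.map_nil]
    rw [← hr]
    -- f r is ≤ every element of the full cost list (pyRange 0 n).map f
    have hle0 : f r ≤ f 0 := hmin ▸ (PySem.List.foldl_min_le _ (f 0)).1
    have hlet : ∀ y ∈ (PySem.List.pyRange 1 n 1).map f, f r ≤ y :=
      fun y hy => hmin ▸ (PySem.List.foldl_min_le _ (f 0)).2 y hy
    have hall : ∀ y ∈ (PySem.List.pyRange 0 n 1).map f, f r ≤ y := by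
      intro y hy
      rw [PySem.List.pyRange_one_cons (by omega : (0:Int) < n), List.map_cons, List.mem_cons, zero_add] at hy
      rcases hy with hy | hy
      · exact hy ▸ hle0
      · exact hlet y hy
    by_cases hc : f n < f r
    · rw [if_pos hc]
      refine ⟨by omega, by omega, ?_, ?_⟩
      · rw [← hmin]; omega
      · have hnot : f n ∉ (PySem.List.pyRange 0 n 1).map f := by
          intro hmem
          have := hall (f n) hmem
          omega
        rw [PySem.List.index?_append_singleton_self _ (f n) hnot]
        simp [PySem.List.length_pyRange_one]
    · rw [if_neg hc]
      refine ⟨h0, by omega, ?_, ?_⟩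
      · rw [← hmin]; omega
      · have hmem : f r ∈ (PySem.List.pyRange 0 n 1).map f := by
          rw [← PySem.List.index?_isSome_iff, hidx]
          rfl
        rw [PySem.List.index?_append_of_mem _ hmem, hidx]

-- A's costs list is the map of the cost key over the index range
lemma costs_eq_map (routes : List (List (Int × Int))) :
    (PySem.List.pyRange 0 (routes.length : Int) 1).foldl
      (fun acc i => acc ++ [(PySem.List.pyGetD routes i []).foldl (fun cost n => cost + n.2) 0]) []
    = (PySem.List.pyRange 0 (routes.length : Int) 1).map
        (fun i => (PySem.List.pyGetD routes i []).foldl (fun cost n => cost + n.2) 0) := by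
  rw [PySem.List.foldl_append_singleton_eq_map]
  rfl

-- ===== VERDICT (by name: the statement is the Claim_ definition above) =====
theorem find_cheapest_route_spec : Claim_equal_find_cheapest_route := by
  intro routes _ hpre
  unfold Spec_find_cheapest_route find_cheapest_route find_cheapest_route_alt
  have hn : 1 ≤ (routes.length : Int) := by
    cases routes with
    | nil => exact absurd rfl hpre
    | cons r rs => simp
  set f : Int → Int := fun i => (PySem.List.pyGetD routes i []).foldl (fun a n => a + n.2) 0 with hf
  obtain ⟨h0, h1, hmin, hidx⟩ := argmin_range f (routes.length : Int) hn
  set r := (PySem.List.pyRange 1 (routes.length : Int) 1).foldl (fun h x => if f x < f h then x else h) 0 with hr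
  -- A side
  rw [costs_eq_map, PySem.List.pyRange_one_cons (by omega : (0:Int) < (routes.length : Int)),
      List.map_cons, PySem.List.min?_id_cons]
  rw [PySem.List.pyRange_one_cons (by omega : (0:Int) < (routes.length : Int)), List.map_cons] at hidx
  simp only [zero_add] at hidx ⊢
  rw [← hmin, hidx]
  -- B side
  have hsort : (PySem.List.sorted (PySem.List.pyRange 0 (routes.length : Int) 1) f false).head? = some r := by
    rw [PySem.List.sorted_eq_foldl_insertBy,
        PySem.List.pyRange_one_cons (by omega : (0:Int) < (routes.length : Int)), List.foldl_cons]
    exact head_foldl_insertBy f _ 0 []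
  rw [PySem.List.pyRange_one_cons (by omega : (0:Int) < (routes.length : Int))] at hsort
  simp only [zero_add] at hsort
  cases hs : PySem.List.sorted (0 :: PySem.List.pyRange 1 (routes.length : Int) 1) f false with
  | nil => rw [hs] at hsort; exact absurd hsort (by simp)
  | cons a t =>
    rw [hs] at hsort
    simp only [List.head?_cons, Option.some.injEq] at hsort
    simp [hsort, Option.getD, Int.toNat_of_nonneg h0]
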